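-- pv_equiv track=rewrite | github.com/tnakaicode/jburkardt-python | r8ccs/r8ccs.py | i4_log_10
-- ===== SOURCE A (Python) =====
-- def i4_log_10 ( i ):
--
-- #*****************************************************************************80
-- #
-- ## i4_log_10() returns the integer part of the logarithm base 10 of ABS(X).
-- #
-- #  Example:
-- #
-- #        I  VALUE
-- #    -----  --------
-- #        0    0
-- #        1    0
-- #        2    0
-- #        9    0
-- #       10    1
-- #       11    1
-- #       99    1
-- #      100    2
-- #      101    2
-- #      999    2
-- #     1000    3
-- #     1001    3
-- #     9999    3
-- #    10000    4
-- #
-- #  Discussion: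
-- #
-- #    I4_LOG_10 ( I ) + 1 is the number of decimal digits in I.
-- #
-- #  Licensing:
-- #
-- #    This code is distributed under the MIT license.
-- #
-- #  Modified:
-- #
-- #    08 May 2013
-- #
-- #  Author:
-- #
-- #    John Burkardt
-- #
-- #  Input:
-- #
-- #    integer I, the number whose logarithm base 10 is desired.
-- #
-- #  Output:
-- #
-- #    integer VALUE, the integer part of the logarithm base 10 of
-- #    the absolute value of X.
-- #
--   if ( i == 0 ):
--
--     value = 0
--
--   else:
--
--     value = 0
--     ten_pow = 10
--
--     i_abs = abs ( i )
--
--     while ( ten_pow <= i_abs ):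
--       value = value + 1
--       ten_pow = ten_pow * 10
--
--   return value
-- ===== SOURCE B (Python) =====
-- def i4_log_10(i):
--     return len(str(abs(int(i)))) - 1
-- ===== Notes on version B (the rewrite author's own statement) =====
-- stated objective: simpler
-- what changed: Replaced the while-loop that grows a power of ten until it exceeds |i| with a direct decimal digit count: len(str(abs(i))) - 1.
import Mathlib
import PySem

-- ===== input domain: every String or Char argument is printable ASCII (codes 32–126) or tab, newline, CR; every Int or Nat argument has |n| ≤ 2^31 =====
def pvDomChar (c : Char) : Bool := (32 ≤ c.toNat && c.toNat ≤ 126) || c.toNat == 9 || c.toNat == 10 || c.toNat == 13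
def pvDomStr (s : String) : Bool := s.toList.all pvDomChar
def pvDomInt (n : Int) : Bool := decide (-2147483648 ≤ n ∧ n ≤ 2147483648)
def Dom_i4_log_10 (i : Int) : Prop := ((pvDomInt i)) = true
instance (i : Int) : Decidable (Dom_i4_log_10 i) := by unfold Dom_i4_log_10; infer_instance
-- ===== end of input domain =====

-- B replaces A's while-loop over growing powers of ten by a decimal digit count (length of str(abs(i)) minus one): simpler, no loop state.


-- ===== PORT A =====
-- the while-loop: value, ten_pow evolve; ten_pow stays positive (the proof argument h records that)
def i4_log_10_loop (iabs tp : Nat) (v : Int) (h : 0 < tp) : Int :=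
  if _h : tp ≤ iabs then i4_log_10_loop iabs (tp * 10) (v + 1) (by omega) else v
termination_by iabs + 1 - tp
decreasing_by omega

def i4_log_10 (i : Int) : Int :=
  if i == 0 then 0 else i4_log_10_loop i.natAbs 10 0 (by omega)

-- ===== PORT B =====
-- len(str(abs(int(i)))) - 1
def i4_log_10_alt (i : Int) : Int :=
  ((PySem.Int.toChars |i|).length : Int) - 1

-- ===== PRECONDITION & SPEC =====
def Spec_i4_log_10 (i : Int) (out : Int) : Prop := out = i4_log_10_alt i
instance (i : Int) (out : Int) : Decidable (Spec_i4_log_10 i out) := by unfold Spec_i4_log_10; infer_instance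

-- ===== CLAIM (what is proved, stated in full; the proofs are below) =====
def Claim_equal_i4_log_10 : Prop := ∀ (i : Int), Dom_i4_log_10 i → Spec_i4_log_10 i (i4_log_10 i)

-- ===== LEMMAS AND PROOFS =====

-- exact length of Nat.toDigitsCore at base 10 with sufficient fuel
theorem pv_toDigitsCore_len (e : ℕ) : ∀ (n : ℕ) (acc : List Char), n < 10 ^ (e + 1) →
    (Nat.toDigitsCore 10 (e + 1) n acc).length = acc.length + Nat.log 10 n + 1 := by
  induction e with
  | zero =>
    intro n acc hn
    have h10 : n / 10 = 0 := Nat.div_eq_of_lt (by simpa using hn)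
    simp [Nat.toDigitsCore, h10, Nat.log_of_lt (by simpa using hn)]
  | succ e ih =>
    intro n acc hn
    by_cases h0 : n / 10 = 0
    · have hlt : n < 10 := by omega
      simp [Nat.toDigitsCore, h0, Nat.log_of_lt hlt]
    · have hge : 10 ≤ n := by
        by_contra hc
        exact h0 (Nat.div_eq_of_lt (by omega))
      have hstep : Nat.toDigitsCore 10 (e + 1 + 1) n acc
          = Nat.toDigitsCore 10 (e + 1) (n / 10) (Nat.digitChar (n % 10) :: acc) := by
        simp [Nat.toDigitsCore, h0]
      have hdiv : n / 10 < 10 ^ (e + 1) := by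
        rw [Nat.div_lt_iff_lt_mul (by omega)]
        calc n < 10 ^ (e + 1 + 1) := hn
        _ = 10 ^ (e + 1) * 10 := by ring
      rw [hstep, ih (n / 10) _ hdiv, Nat.log_of_one_lt_of_le (by omega) hge]
      simp
      omega

theorem pv_toChars_len (n : ℕ) : (PySem.Int.toChars (n : Int)).length = Nat.log 10 n + 1 := by
  have hlt : n < 10 ^ (n + 1) :=
    lt_of_lt_of_le (Nat.lt_pow_self (by omega)) (Nat.pow_le_pow_right (by omega) (by omega))
  simp only [PySem.Int.toChars]
  rw [if_neg (by omega)]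
  have : Int.toNat (n : Int) = n := Int.toNat_natCast n
  rw [this]
  simpa using pv_toDigitsCore_len n n [] hlt

theorem pv_loop_eq (n tp : ℕ) (v : Int) (h : 0 < tp) :
    i4_log_10_loop n tp v h = if tp ≤ n then v + 1 + Nat.log 10 (n / tp) else v := by
  fun_induction i4_log_10_loop n tp v h with
  | case1 tp v hpos hle ih =>
    rw [ih, if_pos hle]
    by_cases h2 : tp * 10 ≤ n
    · rw [if_pos h2]
      have h10 : 10 ≤ n / tp := by
        rw [Nat.le_div_iff_mul_le hpos]; omega
      have hdd : n / (tp * 10) = n / tp / 10 := (Nat.div_div_eq_div_mul n tp 10).symm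
      rw [hdd, Nat.log_of_one_lt_of_le (by omega : (1:ℕ) < 10) h10]
      push_cast; ring
    · rw [if_neg h2]
      have hlt : n / tp < 10 := by
        rw [Nat.div_lt_iff_lt_mul hpos]; omega
      rw [Nat.log_of_lt hlt]
      ring
  | case2 tp v hpos hnle =>
    rw [if_neg hnle]

-- ===== VERDICT (by name: the statement is the Claim_ definition above) =====
theorem i4_log_10_spec : Claim_equal_i4_log_10 := by
  intro i _
  unfold Spec_i4_log_10 i4_log_10 i4_log_10_alt
  have habs : |i| = (i.natAbs : Int) := Int.abs_eq_natAbs i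
  rw [habs, pv_toChars_len i.natAbs]
  by_cases h0 : i = 0
  · subst h0; simp
  · rw [if_neg (by simpa using h0), pv_loop_eq]
    by_cases hge : 10 ≤ i.natAbs
    · rw [if_pos hge, Nat.log_of_one_lt_of_le (by omega) hge]
      push_cast; ring
    · rw [if_neg hge, Nat.log_of_lt (by omega)]
      simp
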